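-- pv_equiv track=rewrite | github.com/xaviripo/pycky | pycky/bin/pycky.py | _process_scopes
-- ===== SOURCE A (Python) =====
-- def _process_scopes(scopes):
--     """Given a list of scopes, returns a dictionary associating to each scope
--     a list of inspectables or a wildcard element '*'."""
--
--     modules = {}
--
--     for scope in scopes:
--
--         if ':' in scope: # This is an inspectable or list thereof
--             module, inspectable = scope.split(':')
--         else:
--             module = scope
--             inspectable = '*'
--
--         if module not in modules:
--             modules[module] = set()
--         modules[module].add(inspectable)
--
--     return modules
-- ===== SOURCE B (Python) =====
-- def _process_scopes(scopes):
--     """Given a list of scopes, returns a dictionary associating to each scope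
--     a list of inspectables or a wildcard element '*'."""
--
--     def parse(scope):
--         if ':' in scope:
--             module, inspectable = scope.split(':')
--             return module, inspectable
--         return scope, '*'
--
--     pairs = [parse(scope) for scope in scopes]
--
--     order = []
--     for module, _ in pairs:
--         if module not in order:
--             order.append(module)
--
--     return {module: set(i for m, i in pairs if m == module) for module in order}
-- ===== Notes on version B (the rewrite author's own statement) =====
-- stated objective: alternative
-- what changed: Replaces the incremental build-as-you-go dict-of-sets aggregation with a three-stage pipeline: a parse pass producing (module, inspectable) pairs, a pass collecting modules in first-occurrence order, and a dict comprehension that builds each module's set by filtering the parsed pairs.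
import Mathlib
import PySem

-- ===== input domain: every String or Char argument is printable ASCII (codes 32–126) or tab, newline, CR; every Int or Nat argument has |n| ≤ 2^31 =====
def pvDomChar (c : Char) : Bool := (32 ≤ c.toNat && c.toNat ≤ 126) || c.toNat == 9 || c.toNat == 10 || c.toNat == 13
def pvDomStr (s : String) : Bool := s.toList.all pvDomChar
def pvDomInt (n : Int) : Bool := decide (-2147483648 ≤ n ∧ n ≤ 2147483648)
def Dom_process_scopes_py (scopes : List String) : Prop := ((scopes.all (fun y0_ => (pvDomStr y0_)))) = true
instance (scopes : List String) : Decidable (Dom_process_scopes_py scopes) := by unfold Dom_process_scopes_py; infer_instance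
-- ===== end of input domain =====

-- B replaces A's incremental dict-of-sets aggregation with a parse pass, a key-collection
-- pass and a per-module filter ("alternative" decomposition; not claimed faster).

-- ===== PORT A =====
def process_scopes_py (scopes : List String) : List (String × List String) :=
  (scopes.foldl
    (fun modules scope =>
      let mi : String × String :=
        if PySem.Str.isIn ":" scope then
          match PySem.Str.split? scope ":" with
          | some [m, i] => (m, i)
          | _ => ("", "")  -- split into ≠ 2 parts: ValueError in Python, excluded by Pre_
        else (scope, "*")
      let modules := if modules.contains mi.1 then modules
                     else modules.insert mi.1 PySem.Set.empty
      modules.modify mi.1 PySem.Set.empty (fun s => PySem.Set.add s mi.2))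
    PySem.Dict.empty).items

-- ===== PORT B =====
def parseScope (scope : String) : String × String :=
  if PySem.Str.isIn ":" scope then
    let parts := (PySem.Str.split? scope ":").getD []
    -- the two-element unpacking 'module, inspectable = scope.split(':')';
    -- ≠ 2 parts raises ValueError in Python, excluded by Pre_
    if parts.length = 2 then (parts.headD "", (parts.drop 1).headD "") else ("", "")
  else (scope, "*")

def process_scopes_py_alt (scopes : List String) : List (String × List String) :=
  let pairs := scopes.map parseScope
  let order := pairs.foldl (fun acc p => if p.1 ∈ acc then acc else acc ++ [p.1]) []
  order.map (fun m =>
    (m, PySem.Set.ofList ((pairs.filter (fun q => q.1 == m)).map (fun q => q.2))))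

-- ===== PRECONDITION & SPEC =====
-- Pre_ excludes scopes containing more than one ':', on which A's two-element unpacking
-- of scope.split(':') raises ValueError (B raises there too).
def Pre_process_scopes_py (scopes : List String) : Prop :=
  ∀ s ∈ scopes, PySem.Str.count s ":" ≤ 1
instance (scopes : List String) : Decidable (Pre_process_scopes_py scopes) := by
  unfold Pre_process_scopes_py; infer_instance
def pvWitness_process_scopes_py : List String :=
  ["foo:bar", "foo", "baz:qux", "foo:bar", ""]
def Spec_process_scopes_py (scopes : List String) (out : List (String × List String)) : Prop := out = process_scopes_py_alt scopes
instance (scopes : List String) (out : List (String × List String)) : Decidable (Spec_process_scopes_py scopes out) := by unfold Spec_process_scopes_py; infer_instance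

-- ===== CLAIM (what is proved, stated in full; the proofs are below) =====
def Claim_equal_process_scopes_py : Prop := ∀ (scopes : List String), Dom_process_scopes_py scopes → Pre_process_scopes_py scopes → Spec_process_scopes_py scopes (process_scopes_py scopes)

-- ===== LEMMAS AND PROOFS =====

-- A's loop body, as a step function over parsed pairs.
def pvStep (d : PySem.Dict String (PySem.Set String)) (p : String × String) :
    PySem.Dict String (PySem.Set String) :=
  (if d.contains p.1 then d else d.insert p.1 PySem.Set.empty).modify
    p.1 PySem.Set.empty (fun s => PySem.Set.add s p.2)

-- B's first-occurrence key order and per-module value.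
def pvOrd (ps : List (String × String)) : List String :=
  ps.foldl (fun acc p => if p.1 ∈ acc then acc else acc ++ [p.1]) []

def pvVal (ps : List (String × String)) (m : String) : List String :=
  PySem.Set.ofList ((ps.filter (fun q => q.1 == m)).map (fun q => q.2))

def pvTab (ps : List (String × String)) : List (String × List String) :=
  (pvOrd ps).map (fun m => (m, pvVal ps m))

theorem pvOrd_aux_mem (ps : List (String × String)) :
    ∀ (acc : List String) (x : String),
      x ∈ ps.foldl (fun acc p => if p.1 ∈ acc then acc else acc ++ [p.1]) acc ↔
        (x ∈ acc ∨ x ∈ ps.map Prod.fst) := by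
  induction ps with
  | nil => simp
  | cons p ps ih =>
    intro acc x
    simp only [List.foldl_cons, List.map_cons, List.mem_cons]
    by_cases h : p.1 ∈ acc
    · simp only [if_pos h, ih]
      constructor
      · rintro (hx | hx)
        · exact Or.inl hx
        · exact Or.inr (Or.inr hx)
      · rintro (hx | hx | hx)
        · exact Or.inl hx
        · exact Or.inl (hx ▸ h)
        · exact Or.inr hx
    · simp only [if_neg h, ih, List.mem_append, List.mem_singleton]
      tauto

theorem mem_pvOrd (ps : List (String × String)) (x : String) :
    x ∈ pvOrd ps ↔ x ∈ ps.map Prod.fst := by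
  unfold pvOrd
  rw [pvOrd_aux_mem]
  simp

theorem pvOrd_aux_nodup (ps : List (String × String)) :
    ∀ (acc : List String), acc.Nodup →
      (ps.foldl (fun acc p => if p.1 ∈ acc then acc else acc ++ [p.1]) acc).Nodup := by
  induction ps with
  | nil => intro acc h; simpa using h
  | cons p ps ih =>
    intro acc h
    simp only [List.foldl_cons]
    by_cases hm : p.1 ∈ acc
    · rw [if_pos hm]; exact ih acc h
    · rw [if_neg hm]
      refine ih _ ?_
      rw [List.nodup_append]
      refine ⟨h, List.nodup_singleton _, ?_⟩
      intro a ha b hb he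
      exact hm ((he.trans (List.mem_singleton.mp hb)) ▸ ha)

theorem nodup_pvOrd (ps : List (String × String)) : (pvOrd ps).Nodup :=
  pvOrd_aux_nodup ps [] List.nodup_nil

theorem pvOrd_append (ps : List (String × String)) (p : String × String) :
    pvOrd (ps ++ [p]) = if p.1 ∈ pvOrd ps then pvOrd ps else pvOrd ps ++ [p.1] := by
  unfold pvOrd
  rw [List.foldl_append]
  rfl

theorem pvVal_append (ps : List (String × String)) (p : String × String) (m : String) :
    pvVal (ps ++ [p]) m =
      if p.1 == m then PySem.Set.add (pvVal ps m) p.2 else pvVal ps m := by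
  unfold pvVal
  rw [List.filter_append]
  by_cases h : p.1 == m
  · simp only [List.filter_cons, h, if_pos, List.filter_nil, List.map_append, List.map_cons,
      List.map_nil]
    exact PySem.Set.ofList_append_singleton _ _
  · have h' : (p.1 == m) = false := by simpa using h
    simp [h']

theorem pvVal_of_not_mem (ps : List (String × String)) (m : String)
    (h : m ∉ ps.map Prod.fst) : pvVal ps m = [] := by
  unfold pvVal
  have : ps.filter (fun q => q.1 == m) = [] := by
    rw [List.filter_eq_nil_iff]
    intro q hq
    simp only [beq_iff_eq]
    intro he
    exact h (he ▸ List.mem_map_of_mem hq)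
  rw [this]
  rfl

theorem fst_pvTab (ps : List (String × String)) :
    (pvTab ps).map Prod.fst = pvOrd ps := by
  simp [pvTab, List.map_map, Function.comp_def]

theorem keys_pvTab (ps : List (String × String)) :
    (PySem.Dict.mk (pvTab ps)).keys = pvOrd ps := by
  simp only [PySem.Dict.keys]
  exact fst_pvTab ps

theorem getD_pvTab (ps : List (String × String)) (m : String) (hm : m ∈ pvOrd ps) :
    (PySem.Dict.mk (pvTab ps)).getD m PySem.Set.empty = pvVal ps m := by
  have hk : (PySem.Dict.mk (pvTab ps)).keys.Nodup := by
    rw [keys_pvTab]; exact nodup_pvOrd ps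
  have hmem : (m, pvVal ps m) ∈ (PySem.Dict.mk (pvTab ps)).items := by
    simp only [pvTab]
    exact List.mem_map_of_mem hm
  exact PySem.Dict.getD_of_mem_items _ hmem hk _

theorem contains_pvTab (ps : List (String × String)) (m : String) :
    (PySem.Dict.mk (pvTab ps)).contains m = true ↔ m ∈ pvOrd ps := by
  rw [PySem.Dict.contains_iff_mem_keys, keys_pvTab]

theorem pvStep_tab (ps : List (String × String)) (p : String × String) :
    (pvStep (PySem.Dict.mk (pvTab ps)) p).items = pvTab (ps ++ [p]) := by
  by_cases hc : p.1 ∈ pvOrd ps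
  · -- module already present: modify its set in place
    have hcontains : (PySem.Dict.mk (pvTab ps)).contains p.1 = true :=
      (contains_pvTab ps p.1).mpr hc
    unfold pvStep
    rw [if_pos hcontains]
    unfold PySem.Dict.modify
    rw [getD_pvTab ps p.1 hc, PySem.Dict.items_insert_of_contains _ _ hcontains]
    simp only [pvTab, pvOrd_append, if_pos hc, List.map_map]
    apply List.map_congr_left
    intro m hm
    by_cases he : p.1 = m
    · subst he
      simp [pvVal_append, Function.comp]
    · have h1 : (m == p.1) = false := by simp [Ne.symm he]
      have h2 : (p.1 == m) = false := by simp [he]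
      simp [Function.comp, h1, pvVal_append, h2]
  · -- new module: insert an empty set, then add the inspectable to it
    have hcontains : (PySem.Dict.mk (pvTab ps)).contains p.1 = false := by
      rw [← Bool.not_eq_true, contains_pvTab]; exact hc
    have hnk : p.1 ∉ ps.map Prod.fst := fun h => hc ((mem_pvOrd ps p.1).mpr h)
    unfold pvStep
    rw [if_neg (by simp [hcontains])]
    have hitems' :
        ((PySem.Dict.mk (pvTab ps)).insert p.1 PySem.Set.empty).items =
          pvTab ps ++ [(p.1, PySem.Set.empty)] :=
      PySem.Dict.items_insert_of_not_contains _ _ hcontains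
    have hkeys' : ((PySem.Dict.mk (pvTab ps)).insert p.1 PySem.Set.empty).keys.Nodup := by
      simp only [PySem.Dict.keys, hitems', List.map_append, fst_pvTab ps]
      rw [List.nodup_append]
      refine ⟨nodup_pvOrd ps, by simp, ?_⟩
      intro a ha b hb he
      have hax : a = p.1 := he.trans (List.mem_singleton.mp hb)
      exact hc (hax ▸ ha)
    have hgetD :
        ((PySem.Dict.mk (pvTab ps)).insert p.1 PySem.Set.empty).getD p.1 PySem.Set.empty =
          PySem.Set.empty := by
      refine PySem.Dict.getD_of_mem_items _ (k := p.1) (v := PySem.Set.empty) ?_ hkeys' _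
      rw [hitems']
      exact List.mem_append_right _ (List.mem_singleton_self _)
    unfold PySem.Dict.modify
    rw [hgetD, PySem.Dict.items_insert_of_contains _ _ (PySem.Dict.contains_insert_self _ _ _),
      hitems', List.map_append]
    have hnochange :
        (pvTab ps).map
            (fun q => if q.1 == p.1 then (p.1, PySem.Set.add PySem.Set.empty p.2) else q) =
          pvTab ps := by
      have hpt : ∀ q ∈ pvTab ps,
          (if q.1 == p.1 then (p.1, PySem.Set.add PySem.Set.empty p.2) else q) = id q := by
        intro q hq
        have hq1 : q.1 ∈ pvOrd ps := by
          have := List.mem_map_of_mem (f := Prod.fst) hq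
          rwa [fst_pvTab ps] at this
        have hne : (q.1 == p.1) = false := by
          simp only [beq_eq_false_iff_ne, ne_eq]
          intro he
          exact hc (he ▸ hq1)
        simp [hne]
      rw [List.map_congr_left hpt, List.map_id]
    rw [hnochange]
    simp only [pvTab, pvOrd_append, if_neg hc, List.map_append, List.map_cons, List.map_nil]
    congr 1
    · apply List.map_congr_left
      intro m hm
      have hne : (p.1 == m) = false := by
        simp only [beq_eq_false_iff_ne, ne_eq]
        intro he
        exact hc (he ▸ hm)
      rw [pvVal_append, hne]
      simp
    · rw [pvVal_append]
      simp only [beq_self_eq_true, if_pos]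
      rw [pvVal_of_not_mem ps p.1 hnk]
      rfl

theorem foldl_pvStep_eq_pvTab (ps : List (String × String)) :
    (ps.foldl pvStep PySem.Dict.empty).items = pvTab ps := by
  induction ps using List.reverseRecOn with
  | nil => rfl
  | append_singleton ps p ih =>
    rw [List.foldl_append]
    have hd : ps.foldl pvStep PySem.Dict.empty =
        PySem.Dict.mk ((ps.foldl pvStep PySem.Dict.empty).items) := rfl
    rw [List.foldl_cons, List.foldl_nil, hd, ih]
    exact pvStep_tab ps p

theorem parse_eq (s : String) :
    (if PySem.Str.isIn ":" s then
       match PySem.Str.split? s ":" with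
       | some [m, i] => (m, i)
       | _ => ("", "")
     else (s, "*")) = parseScope s := by
  unfold parseScope
  by_cases h : PySem.Str.isIn ":" s
  · simp only [if_pos h]
    rcases hsp : PySem.Str.split? s ":" with _ | parts
    · rfl
    · rcases parts with _ | ⟨m, _ | ⟨i, _ | ⟨r, rest⟩⟩⟩
      · rfl
      · rfl
      · rfl
      · have hlen : ¬ ((m :: i :: r :: rest).length = 2) := by simp
        simp only [Option.getD_some, if_neg hlen]
  · simp only [if_neg h]

theorem processA_eq (scopes : List String) :
    process_scopes_py scopes = ((scopes.map parseScope).foldl pvStep PySem.Dict.empty).items := by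
  unfold process_scopes_py
  rw [List.foldl_map]
  congr 1
  apply PySem.List.foldl_congr_mem
  intro d s _
  show _ = pvStep d (parseScope s)
  rw [← parse_eq s]
  rfl

theorem processB_eq (scopes : List String) :
    process_scopes_py_alt scopes = pvTab (scopes.map parseScope) := rfl

-- ===== VERDICT (by name: the statement is the Claim_ definition above) =====
theorem process_scopes_py_spec : Claim_equal_process_scopes_py := by
  intro scopes _ _
  unfold Spec_process_scopes_py
  rw [processA_eq, processB_eq, foldl_pvStep_eq_pvTab]
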